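-- pv_equiv track=rewrite | github.com/Origin173/astrbot_plugin_mcnews | mcnews/formatter.py | format_latest_versions
-- ===== SOURCE A (Python) =====
-- def format_latest_versions(latest: dict, versions: list) -> str:
--     lines = ["[Minecraft Latest Versions]", ""]
--
--     release_id = latest.get("release", "")
--     snapshot_id = latest.get("snapshot", "")
--
--     release_info = None
--     snapshot_info = None
--
--     for v in versions:
--         if v.get("id") == release_id and not release_info:
--             release_info = v
--         if v.get("id") == snapshot_id and not snapshot_info:
--             snapshot_info = v
--         if release_info and snapshot_info:
--             break
--
--     if release_info:
--         lines.append(f"Release: {release_id}")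
--         lines.append(f"  Released: {release_info.get('releaseTime', 'Unknown')[:10]}")
--
--     if snapshot_info:
--         lines.append("")
--         lines.append(f"Snapshot: {snapshot_id}")
--         lines.append(f"  Released: {snapshot_info.get('releaseTime', 'Unknown')[:10]}")
--
--     return "\n".join(lines)
-- ===== SOURCE B (Python) =====
-- def format_latest_versions(latest: dict, versions: list) -> str:
--     # One pass builds a first-occurrence index by id; the fused search loop
--     # with early break is replaced by two direct lookups.
--     index = {}
--     for v in versions:
--         vid = v.get("id")
--         if vid not in index:
--             index[vid] = v
--
--     release_id = latest.get("release", "")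
--     snapshot_id = latest.get("snapshot", "")
--
--     release_info = index.get(release_id)
--     snapshot_info = index.get(snapshot_id)
--
--     parts = ["[Minecraft Latest Versions]", ""]
--     if release_info:
--         parts += [
--             f"Release: {release_id}",
--             f"  Released: {release_info.get('releaseTime', 'Unknown')[:10]}",
--         ]
--     if snapshot_info:
--         parts += [
--             "",
--             f"Snapshot: {snapshot_id}",
--             f"  Released: {snapshot_info.get('releaseTime', 'Unknown')[:10]}",
--         ]
--     return "\n".join(parts)
-- ===== Notes on version B (the rewrite author's own statement) =====
-- stated objective: simpler
-- what changed: Replaces A's fused search loop over versions with its two found-flags and early break by a single pass that builds a first-occurrence id->version index, followed by two direct dict lookups.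
import Mathlib
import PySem

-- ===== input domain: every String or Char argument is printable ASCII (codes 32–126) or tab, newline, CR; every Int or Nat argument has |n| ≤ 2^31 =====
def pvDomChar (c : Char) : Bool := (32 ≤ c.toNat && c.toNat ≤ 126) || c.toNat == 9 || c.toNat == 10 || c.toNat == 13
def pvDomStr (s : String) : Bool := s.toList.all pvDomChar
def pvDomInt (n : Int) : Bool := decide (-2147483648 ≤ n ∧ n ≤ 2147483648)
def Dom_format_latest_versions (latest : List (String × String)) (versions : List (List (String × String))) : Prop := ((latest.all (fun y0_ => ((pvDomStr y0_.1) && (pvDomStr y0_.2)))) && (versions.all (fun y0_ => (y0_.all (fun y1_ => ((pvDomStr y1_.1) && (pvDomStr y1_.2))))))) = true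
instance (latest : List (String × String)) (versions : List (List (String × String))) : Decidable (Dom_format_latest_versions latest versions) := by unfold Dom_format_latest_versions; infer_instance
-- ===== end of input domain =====

-- B replaces A's fused search loop (two found-flags, early break) by a first-occurrence
-- id->version index built in one pass, then two direct lookups; objective: simpler.


-- shared literal helpers: Python d.get(k) on an association-list dict, dict truthiness,
-- and the identical f-string "  Released: {info.get('releaseTime','Unknown')[:10]}"
def pvDget (v : List (String × String)) (k : String) : Option String :=
  (PySem.Dict.mk v).get? k

def pvTruthy (o : Option (List (String × String))) : Bool :=
  match o with
  | none => false
  | some d => !d.isEmpty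

def pvReleasedLine (d : List (String × String)) : String :=
  "  Released: " ++ PySem.Str.slice ((PySem.Dict.mk d).getD "releaseTime" "Unknown") none (some 10)

-- ===== PORT A =====
-- A's loop: both flags carried, each set on first match, early break once both set
def pvLoopA (rid sid : String) :
    List (List (String × String)) → Option (List (String × String)) → Option (List (String × String)) →
    Option (List (String × String)) × Option (List (String × String))
  | [], r, s => (r, s)
  | v :: rest, r, s =>
    let r' := if pvDget v "id" == some rid && !pvTruthy r then some v else r
    let s' := if pvDget v "id" == some sid && !pvTruthy s then some v else s
    if pvTruthy r' && pvTruthy s' then (r', s') else pvLoopA rid sid rest r' s'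

def format_latest_versions (latest : List (String × String)) (versions : List (List (String × String))) : String :=
  let lines : List String := ["[Minecraft Latest Versions]", ""]
  let release_id := (PySem.Dict.mk latest).getD "release" ""
  let snapshot_id := (PySem.Dict.mk latest).getD "snapshot" ""
  let rs := pvLoopA release_id snapshot_id versions none none
  let lines := match rs.1 with
    | none => lines
    | some rinfo =>
      if rinfo.isEmpty then lines
      else lines ++ ["Release: " ++ release_id] ++ [pvReleasedLine rinfo]
  let lines := match rs.2 with
    | none => lines
    | some sinfo =>
      if sinfo.isEmpty then lines
      else lines ++ [""] ++ ["Snapshot: " ++ snapshot_id] ++ [pvReleasedLine sinfo]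
  PySem.Str.join "\n" lines

-- ===== PORT B =====
-- B's index: first pass keeps the first version seen for each id
def pvIndexB (versions : List (List (String × String))) :
    PySem.Dict (Option String) (List (String × String)) :=
  versions.foldl
    (fun d v => if d.contains (pvDget v "id") then d else d.insert (pvDget v "id") v)
    PySem.Dict.empty

def pvChunkB (info : Option (List (String × String))) (mk : List (String × String) → List String) : List String :=
  match info with
  | none => []
  | some d => if d.isEmpty then [] else mk d

def format_latest_versions_alt (latest : List (String × String)) (versions : List (List (String × String))) : String :=
  let index := pvIndexB versions
  let release_id := (PySem.Dict.mk latest).getD "release" ""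
  let snapshot_id := (PySem.Dict.mk latest).getD "snapshot" ""
  let release_info := index.get? (some release_id)
  let snapshot_info := index.get? (some snapshot_id)
  let parts : List String :=
    ["[Minecraft Latest Versions]", ""]
      ++ pvChunkB release_info (fun d => ["Release: " ++ release_id, pvReleasedLine d])
      ++ pvChunkB snapshot_info (fun d => ["", "Snapshot: " ++ snapshot_id, pvReleasedLine d])
  PySem.Str.join "\n" parts

-- ===== PRECONDITION & SPEC =====
def Spec_format_latest_versions (latest : List (String × String)) (versions : List (List (String × String))) (out : String) : Prop := out = format_latest_versions_alt latest versions
instance (latest : List (String × String)) (versions : List (List (String × String))) (out : String) : Decidable (Spec_format_latest_versions latest versions out) := by unfold Spec_format_latest_versions; infer_instance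

-- ===== CLAIM (what is proved, stated in full; the proofs are below) =====
def Claim_equal_format_latest_versions : Prop := ∀ (latest : List (String × String)) (versions : List (List (String × String))), Dom_format_latest_versions latest versions → Spec_format_latest_versions latest versions (format_latest_versions latest versions)

-- ===== LEMMAS AND PROOFS =====

-- a state of A's loop is either "not found yet" or a truthy (nonempty) match
def pvOk (o : Option (List (String × String))) : Prop :=
  ∀ d, o = some d → d ≠ []

lemma pvOk_none : pvOk none := by intro d h; cases h

lemma pvDget_match_ne_nil {v : List (String × String)} {x : String}
    (h : (pvDget v "id" == some x) = true) : v ≠ [] := by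
  intro hv
  subst hv
  simp [pvDget, PySem.Dict.get?] at h

lemma pvOk_some_of_match {v : List (String × String)} {x : String}
    (h : (pvDget v "id" == some x) = true) : pvOk (some v) := by
  intro d hd
  cases hd
  exact pvDget_match_ne_nil h

-- once a flag is truthy, A's per-element update never changes it
lemma pvFold_keep (id : String) (vs : List (List (String × String)))
    (r : Option (List (String × String))) (h : pvTruthy r = true) :
    vs.foldl (fun r v => if (pvDget v "id" == some id) && !pvTruthy r then some v else r) r = r := by
  induction vs with
  | nil => rfl
  | cons v rest ih =>
    simp only [List.foldl_cons, h, Bool.not_true, Bool.and_false]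
    rw [if_neg (by simp)]
    exact ih

-- A's per-component update loop computes the first match
lemma pvFold_eq (id : String) (vs : List (List (String × String)))
    (r : Option (List (String × String))) (hr : pvOk r) :
    vs.foldl (fun r v => if (pvDget v "id" == some id) && !pvTruthy r then some v else r) r
      = r.or (vs.find? (fun v => pvDget v "id" == some id)) := by
  induction vs generalizing r with
  | nil => simp
  | cons v rest ih =>
    cases r with
    | some d =>
      have hd := hr d rfl
      have ht : pvTruthy (some d) = true := by simp [pvTruthy, hd]
      simp only [List.foldl_cons, ht, Bool.not_true, Bool.and_false]
      rw [if_neg (by simp), ih _ hr]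
      simp
    | none =>
      simp only [List.foldl_cons]
      rw [show pvTruthy (none : Option (List (String × String))) = false from rfl]
      simp only [Bool.not_false, Bool.and_true]
      by_cases hp : (pvDget v "id" == some id) = true
      · rw [if_pos hp, ih _ (pvOk_some_of_match hp), List.find?_cons_of_pos (p := fun v => pvDget v "id" == some id) hp]
        simp
      · rw [if_neg hp, ih _ pvOk_none, List.find?_cons_of_neg (p := fun v => pvDget v "id" == some id) hp]

-- A's fused loop with early break equals the two independent update loops
lemma pvLoopA_fold (rid sid : String) (vs : List (List (String × String)))
    (r s : Option (List (String × String))) :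
    pvLoopA rid sid vs r s =
      (vs.foldl (fun r v => if (pvDget v "id" == some rid) && !pvTruthy r then some v else r) r,
       vs.foldl (fun s v => if (pvDget v "id" == some sid) && !pvTruthy s then some v else s) s) := by
  induction vs generalizing r s with
  | nil => rfl
  | cons v rest ih =>
    simp only [pvLoopA, List.foldl_cons]
    by_cases hb : (pvTruthy (if (pvDget v "id" == some rid) && !pvTruthy r then some v else r)
        && pvTruthy (if (pvDget v "id" == some sid) && !pvTruthy s then some v else s)) = true
    · rw [if_pos hb, pvFold_keep _ _ _ (Bool.and_elim_left hb), pvFold_keep _ _ _ (Bool.and_elim_right hb)]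
    · rw [if_neg hb, ih]

lemma pvLoopA_eq (rid sid : String) (vs : List (List (String × String))) :
    pvLoopA rid sid vs none none =
      (vs.find? (fun v => pvDget v "id" == some rid),
       vs.find? (fun v => pvDget v "id" == some sid)) := by
  rw [pvLoopA_fold, pvFold_eq _ _ _ pvOk_none, pvFold_eq _ _ _ pvOk_none]
  simp

lemma pvIndexB_get (vs : List (List (String × String)))
    (d : PySem.Dict (Option String) (List (String × String))) (k : Option String) :
    (vs.foldl (fun d v => if d.contains (pvDget v "id") then d else d.insert (pvDget v "id") v) d).get? k
      = (d.get? k).or (vs.find? (fun v => pvDget v "id" == k)) := by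
  induction vs generalizing d with
  | nil => simp
  | cons v rest ih =>
    simp only [List.foldl_cons, List.find?_cons]
    by_cases hk : (pvDget v "id" == k) = true
    · have hk' : pvDget v "id" = k := by simpa using hk
      by_cases hc : d.contains (pvDget v "id") = true
      · rw [if_pos hc, ih]
        have hsome : (d.get? k).isSome = true := by
          rw [← hk', ← PySem.Dict.contains_eq_isSome_get?]; exact hc
        cases hx : d.get? k with
        | none => rw [hx] at hsome; cases hsome
        | some w => simp [hk]
      · rw [if_neg hc, ih, PySem.Dict.get?_insert]
        have hnone : d.get? k = none := by
          rw [← hk']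
          cases hx : d.get? (pvDget v "id") with
          | none => rfl
          | some w => exact absurd (by rw [PySem.Dict.contains_eq_isSome_get?, hx]; rfl) hc
        rw [if_pos hk'.symm, hnone]
        simp [hk]
    · have hk2 : ¬ k = pvDget v "id" := fun h => hk (by simp [h])
      by_cases hc : d.contains (pvDget v "id") = true
      · rw [if_pos hc, ih]; simp [hk]
      · rw [if_neg hc, ih, PySem.Dict.get?_insert, if_neg hk2]; simp [hk]

-- ===== VERDICT (by name: the statement is the Claim_ definition above) =====
theorem format_latest_versions_spec : Claim_equal_format_latest_versions := by
  intro latest versions _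
  unfold Spec_format_latest_versions format_latest_versions format_latest_versions_alt pvIndexB
  simp only [pvLoopA_eq, pvIndexB_get, PySem.Dict.get?_empty, Option.none_or]
  cases versions.find? (fun v => pvDget v "id" == some ((PySem.Dict.mk latest).getD "release" "")) with
  | none =>
    cases versions.find? (fun v => pvDget v "id" == some ((PySem.Dict.mk latest).getD "snapshot" "")) with
    | none => simp [pvChunkB]
    | some sinfo => by_cases h : sinfo.isEmpty = true <;> simp [pvChunkB, h]
  | some rinfo =>
    cases versions.find? (fun v => pvDget v "id" == some ((PySem.Dict.mk latest).getD "snapshot" "")) with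
    | none => by_cases h : rinfo.isEmpty = true <;> simp [pvChunkB, h]
    | some sinfo =>
      by_cases h1 : rinfo.isEmpty = true <;> by_cases h2 : sinfo.isEmpty = true <;>
        simp [pvChunkB, h1, h2]
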